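-- pv_equiv track=rewrite | github.com/theshipsagent/us-bulk-supply-chain-platform | 02_TOOLSETS/policy_analysis/usace_entrance_clearance/02_SCRIPTS/grouped_vessel_analysis.py | categorize_vessel
-- ===== SOURCE A (Python) =====
-- def categorize_vessel(vessel_type: str) -> str:
--     """Categorize vessel into major groups."""
--     vessel_lower = vessel_type.lower()
--
--     # Bulkers
--     if 'bulk' in vessel_lower:
--         return 'Bulkers'
--
--     # Tankers
--     if 'tanker' in vessel_lower or 'chemical' in vessel_lower:
--         return 'Tankers'
--
--     # General Cargo
--     if 'general cargo' in vessel_lower or 'cargo' in vessel_lower: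
--         return 'General Cargo'
--
--     # RoRo (Roll-on/Roll-off, vehicle carriers, car carriers)
--     if any(x in vessel_lower for x in ['roro', 'ro-ro', 'pcc', 'pctc', 'vehicle', 'car carrier']):
--         return 'RoRo'
--
--     # Containers
--     if 'container' in vessel_lower:
--         return 'Containers'
--
--     # Cruise
--     if 'cruise' in vessel_lower or 'passenger' in vessel_lower:
--         return 'Cruise'
--
--     # All others (LNG, LPG, specialized, etc.)
--     return 'Others'
-- ===== SOURCE B (Python) =====
-- KEYWORDS = [("bulk", 0), ("tanker", 1), ("chemical", 1), ("cargo", 2),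
--             ("roro", 3), ("ro-ro", 3), ("pcc", 3), ("pctc", 3),
--             ("vehicle", 3), ("car carrier", 3), ("container", 4),
--             ("cruise", 5), ("passenger", 5)]
-- LABELS = ["Bulkers", "Tankers", "General Cargo", "RoRo",
--           "Containers", "Cruise", "Others"]
--
--
-- def categorize_vessel(vessel_type: str) -> str:
--     """Categorize vessel into major groups."""
--     s = vessel_type.lower()
--     best = 6  # index into LABELS; 6 = no group matched yet
--     for i in range(len(s)):
--         for kw, g in KEYWORDS:
--             if g < best and s.startswith(kw, i):
--                 best = g
--     return LABELS[best]
-- ===== Notes on version B (the rewrite author's own statement) =====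
-- stated objective: alternative
-- what changed: Instead of a chain of substring-membership tests per group, B makes one left-to-right scan over the positions of the lowered string, maintaining the minimum priority index of any keyword that starts at the current position, and finally maps that index to its label.
import Mathlib
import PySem

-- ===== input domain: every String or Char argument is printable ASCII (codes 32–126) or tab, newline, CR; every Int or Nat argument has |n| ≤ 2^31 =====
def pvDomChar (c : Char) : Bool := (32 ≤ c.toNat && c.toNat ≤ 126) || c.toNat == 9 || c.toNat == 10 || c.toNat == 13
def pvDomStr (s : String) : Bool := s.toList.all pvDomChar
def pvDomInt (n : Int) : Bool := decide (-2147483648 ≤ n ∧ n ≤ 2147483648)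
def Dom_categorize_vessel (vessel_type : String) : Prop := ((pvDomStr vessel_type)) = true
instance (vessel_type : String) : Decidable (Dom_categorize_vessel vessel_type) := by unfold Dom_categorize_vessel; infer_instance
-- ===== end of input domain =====

-- B replaces A's chain of substring-membership tests by a single positional scan of the
-- lowered string that keeps the minimum priority index of any keyword starting at the
-- current position (objective: alternative).

-- ===== PORT A =====
def categorize_vessel (vessel_type : String) : String :=
  let vessel_lower := PySem.Str.lower vessel_type
  if PySem.Str.isIn "bulk" vessel_lower then "Bulkers"
  else if PySem.Str.isIn "tanker" vessel_lower || PySem.Str.isIn "chemical" vessel_lower then "Tankers"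
  else if PySem.Str.isIn "general cargo" vessel_lower || PySem.Str.isIn "cargo" vessel_lower then "General Cargo"
  else if ["roro", "ro-ro", "pcc", "pctc", "vehicle", "car carrier"].any (fun x => PySem.Str.isIn x vessel_lower) then "RoRo"
  else if PySem.Str.isIn "container" vessel_lower then "Containers"
  else if PySem.Str.isIn "cruise" vessel_lower || PySem.Str.isIn "passenger" vessel_lower then "Cruise"
  else "Others"

-- ===== PORT B =====
def vesselKeywords : List (List Char × Nat) :=
  [("bulk".toList, 0), ("tanker".toList, 1), ("chemical".toList, 1), ("cargo".toList, 2),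
   ("roro".toList, 3), ("ro-ro".toList, 3), ("pcc".toList, 3), ("pctc".toList, 3),
   ("vehicle".toList, 3), ("car carrier".toList, 3), ("container".toList, 4),
   ("cruise".toList, 5), ("passenger".toList, 5)]

def vesselLabels : List String :=
  ["Bulkers", "Tankers", "General Cargo", "RoRo", "Containers", "Cruise", "Others"]

-- Python's s.startswith(kw, i) with 0 ≤ i is PySem.Chars.startswith on s.drop i (exact);
-- LABELS[best] is ported as getD (best ≤ 6 always holds, so the default is unreachable).
def categorize_vessel_alt (vessel_type : String) : String :=
  let s := (PySem.Str.lower vessel_type).toList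
  let best := (List.range s.length).foldl
    (fun best i => vesselKeywords.foldl
      (fun best p =>
        if decide (p.2 < best) && PySem.Chars.startswith (s.drop i) p.1 then p.2 else best)
      best) 6
  vesselLabels.getD best "Others"

-- ===== PRECONDITION & SPEC =====
def Spec_categorize_vessel (vessel_type : String) (out : String) : Prop := out = categorize_vessel_alt vessel_type
instance (vessel_type : String) (out : String) : Decidable (Spec_categorize_vessel vessel_type out) := by unfold Spec_categorize_vessel; infer_instance

-- ===== CLAIM (what is proved, stated in full; the proofs are below) =====
def Claim_equal_categorize_vessel : Prop := ∀ (vessel_type : String), Dom_categorize_vessel vessel_type → Spec_categorize_vessel vessel_type (categorize_vessel vessel_type)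

-- ===== LEMMAS AND PROOFS =====

-- the scan of Source B, parameterised by the position list (proof helper; defeq to the fold in the port)
def bestFrom (s : List Char) (b : Nat) (is : List Nat) : Nat :=
  is.foldl
    (fun best i => vesselKeywords.foldl
      (fun best p =>
        if decide (p.2 < best) && PySem.Chars.startswith (s.drop i) p.1 then p.2 else best)
      best) b

-- minimum-scan fold: result is the old bound or the priority of some satisfied entry,
-- never exceeds the bound, and is ≤ the priority of every satisfied entry
lemma scanMin_spec {α : Type} (f : α → Nat) (c : α → Bool) :
    ∀ (L : List α) (b : Nat),
      (L.foldl (fun b x => if decide (f x < b) && c x then f x else b) b = b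
        ∨ ∃ x ∈ L, c x = true ∧
            L.foldl (fun b x => if decide (f x < b) && c x then f x else b) b = f x)
      ∧ L.foldl (fun b x => if decide (f x < b) && c x then f x else b) b ≤ b
      ∧ ∀ x ∈ L, c x = true →
          L.foldl (fun b x => if decide (f x < b) && c x then f x else b) b ≤ f x := by
  intro L
  induction L with
  | nil => intro b; simp
  | cons x L ih =>
    intro b
    simp only [List.foldl_cons]
    set b' := (if decide (f x < b) && c x then f x else b) with hb'
    obtain ⟨ih1, ih2, ih3⟩ := ih b'
    have hb'le : b' ≤ b := by
      rw [hb']; split_ifs with h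
      · simp only [Bool.and_eq_true, decide_eq_true_eq] at h; omega
      · exact le_refl _
    refine ⟨?_, le_trans ih2 hb'le, ?_⟩
    · rcases ih1 with h | ⟨y, hy, hcy, hr⟩
      · rw [h, hb']
        split_ifs with hcond
        · simp only [Bool.and_eq_true, decide_eq_true_eq] at hcond
          exact Or.inr ⟨x, List.mem_cons_self, hcond.2, rfl⟩
        · exact Or.inl rfl
      · exact Or.inr ⟨y, List.mem_cons_of_mem _ hy, hcy, hr⟩
    · intro y hy hcy
      rcases List.mem_cons.mp hy with rfl | hy'
      · have : b' ≤ f y := by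
          rw [hb']; split_ifs with h
          · exact le_refl _
          · simp only [Bool.and_eq_true, decide_eq_true_eq, not_and_or, not_lt] at h
            rcases h with h | h
            · exact h
            · exact absurd hcy (by simp [h])
        exact le_trans ih2 this
      · exact ih3 y hy' hcy

-- outer fold over positions: same three properties, over pairs (position, keyword entry)
lemma posScan_spec (s : List Char) :
    ∀ (is : List Nat) (b : Nat),
      (bestFrom s b is = b
        ∨ ∃ i ∈ is, ∃ p ∈ vesselKeywords, PySem.Chars.startswith (s.drop i) p.1 = true ∧
            bestFrom s b is = p.2)
      ∧ bestFrom s b is ≤ b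
      ∧ ∀ i ∈ is, ∀ p ∈ vesselKeywords, PySem.Chars.startswith (s.drop i) p.1 = true →
          bestFrom s b is ≤ p.2 := by
  intro is
  induction is with
  | nil => intro b; simp [bestFrom]
  | cons i is ih =>
    intro b
    simp only [bestFrom, List.foldl_cons]
    set b' := vesselKeywords.foldl
      (fun best p => if decide (p.2 < best) && PySem.Chars.startswith (s.drop i) p.1 then p.2 else best) b with hb'
    obtain ⟨s1, s2, s3⟩ := scanMin_spec (fun p => p.2)
      (fun p => PySem.Chars.startswith (s.drop i) p.1) vesselKeywords b
    obtain ⟨ih1, ih2, ih3⟩ := ih b'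
    simp only [bestFrom] at ih1 ih2 ih3
    refine ⟨?_, le_trans ih2 (hb' ▸ s2), ?_⟩
    · rcases ih1 with h | ⟨j, hj, p, hp, hc, hr⟩
      · rw [h, hb']
        rcases s1 with h' | ⟨p, hp, hc, hr⟩
        · exact Or.inl h'
        · exact Or.inr ⟨i, List.mem_cons_self, p, hp, hc, hr⟩
      · exact Or.inr ⟨j, List.mem_cons_of_mem _ hj, p, hp, hc, hr⟩
    · intro j hj p hp hc
      rcases List.mem_cons.mp hj with rfl | hj'
      · exact le_trans ih2 (hb' ▸ s3 p hp hc)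
      · exact ih3 j hj' p hp hc

-- a nonempty keyword is a substring iff it starts at some position of the string
lemma isIn_iff_startswith_at (kw s : List Char) (hkw : kw ≠ []) :
    PySem.Chars.isIn kw s = true ↔
      ∃ i ∈ List.range s.length, PySem.Chars.startswith (s.drop i) kw = true := by
  constructor
  · intro h
    have hex : ∃ j, kw <+: s.drop j := by
      rw [PySem.Chars.exists_prefix_drop_iff_isIn]; exact h
    obtain ⟨j, hj⟩ := hex
    have hjlt : j < s.length := by
      by_contra hge
      have hnil : s.drop j = [] := List.drop_eq_nil_of_le (by omega)
      rw [hnil] at hj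
      exact hkw (List.prefix_nil.mp hj)
    refine ⟨j, List.mem_range.mpr hjlt, ?_⟩
    rw [PySem.Chars.startswith_iff]; exact hj
  · rintro ⟨i, _, hi⟩
    rw [← PySem.Chars.exists_prefix_drop_iff_isIn]
    refine ⟨i, ?_⟩
    rw [PySem.Chars.startswith_iff] at hi; exact hi

-- 'general cargo' contains 'cargo'
lemma general_cargo_imp_cargo (s : List Char) :
    PySem.Chars.isIn "general cargo".toList s = true → PySem.Chars.isIn "cargo".toList s = true := by
  intro h
  rw [PySem.Chars.isIn_iff_infix] at h ⊢
  exact List.IsInfix.trans (by decide : "cargo".toList <:+: "general cargo".toList) h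

-- boolean-or eliminations used by the verdict proof
lemma or_true_elim {a b : Bool} (h : (a || b) = true) : a = true ∨ b = true := by
  cases a <;> cases b <;> simp_all

lemma or_false_elim {a b : Bool} (h : ¬ (a || b) = true) : a = false ∧ b = false := by
  cases a <;> cases b <;> simp_all

-- ===== VERDICT (by name: the statement is the Claim_ definition above) =====
theorem categorize_vessel_spec : Claim_equal_categorize_vessel := by
  intro v _
  unfold Spec_categorize_vessel
  set L := (PySem.Str.lower v).toList with hL
  have alt_eq : categorize_vessel_alt v
      = vesselLabels.getD (bestFrom L 6 (List.range L.length)) "Others" := rfl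
  rw [alt_eq]
  obtain ⟨h1, h2, h3⟩ := posScan_spec L (List.range L.length) 6
  set r := bestFrom L 6 (List.range L.length) with hr
  have hbridge : ∀ kw : String,
      PySem.Str.isIn kw (PySem.Str.lower v) = PySem.Chars.isIn kw.toList L := by
    intro kw; rw [hL]; simp [PySem.Str.isIn]
  have hne : ∀ p ∈ vesselKeywords, p.1 ≠ ([] : List Char) := by
    intro p hp
    simp only [vesselKeywords, List.mem_cons, List.not_mem_nil, or_false] at hp
    rcases hp with rfl|rfl|rfl|rfl|rfl|rfl|rfl|rfl|rfl|rfl|rfl|rfl|rfl <;> decide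
  have hub : ∀ p ∈ vesselKeywords, PySem.Chars.isIn p.1 L = true → r ≤ p.2 := by
    intro p hp hin
    obtain ⟨i, hi, hsw⟩ := (isIn_iff_startswith_at p.1 L (hne p hp)).mp hin
    exact h3 i hi p hp hsw
  have hcase : r = 6 ∨ ∃ p ∈ vesselKeywords, PySem.Chars.isIn p.1 L = true ∧ r = p.2 := by
    rcases h1 with h | ⟨i, hi, p, hp, hc, hrr⟩
    · exact Or.inl h
    · exact Or.inr ⟨p, hp, (isIn_iff_startswith_at p.1 L (hne p hp)).mpr ⟨i, hi, hc⟩, hrr⟩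
  simp only [categorize_vessel]
  by_cases hbulk : PySem.Str.isIn "bulk" (PySem.Str.lower v) = true
  · have hb : PySem.Chars.isIn "bulk".toList L = true := by rw [← hbridge]; exact hbulk
    have hr0 : r = 0 := Nat.le_zero.mp (hub ("bulk".toList, 0) (by simp [vesselKeywords]) hb)
    rw [hr0, if_pos hbulk]; rfl
  · have hb' : PySem.Chars.isIn "bulk".toList L = false := by
      rw [← hbridge]; cases hx : PySem.Str.isIn "bulk" (PySem.Str.lower v)
      · rfl
      · exact absurd hx hbulk
    have hnot0 : r ≠ 0 := by
      intro h0
      rcases hcase with h | ⟨p, hp, hin, hrp⟩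
      · omega
      · rw [h0] at hrp
        simp only [vesselKeywords, List.mem_cons, List.not_mem_nil, or_false] at hp
        rcases hp with rfl|rfl|rfl|rfl|rfl|rfl|rfl|rfl|rfl|rfl|rfl|rfl|rfl <;>
            dsimp only at hrp hin <;>
            first
            | omega
            | (rw [hb'] at hin; exact absurd hin (by decide))
            | (rw [htank'] at hin; exact absurd hin (by decide))
            | (rw [hchem'] at hin; exact absurd hin (by decide))
            | (rw [hc'] at hin; exact absurd hin (by decide))
            | (rw [hro1'] at hin; exact absurd hin (by decide))
            | (rw [hro2'] at hin; exact absurd hin (by decide))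
            | (rw [hro3'] at hin; exact absurd hin (by decide))
            | (rw [hro4'] at hin; exact absurd hin (by decide))
            | (rw [hro5'] at hin; exact absurd hin (by decide))
            | (rw [hro6'] at hin; exact absurd hin (by decide))
            | (rw [hcont'] at hin; exact absurd hin (by decide))
            | (rw [hcru'] at hin; exact absurd hin (by decide))
            | (rw [hpas'] at hin; exact absurd hin (by decide))
    by_cases htk : (PySem.Str.isIn "tanker" (PySem.Str.lower v)
        || PySem.Str.isIn "chemical" (PySem.Str.lower v)) = true
    · have hle1 : r ≤ 1 := by
        rcases or_true_elim htk with h | h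
        · exact hub ("tanker".toList, 1) (by simp [vesselKeywords]) (by rw [← hbridge]; exact h)
        · exact hub ("chemical".toList, 1) (by simp [vesselKeywords]) (by rw [← hbridge]; exact h)
      have hr1 : r = 1 := by omega
      rw [hr1, if_neg hbulk, if_pos htk]; rfl
    · have htk2 := or_false_elim htk
      have htank' : PySem.Chars.isIn "tanker".toList L = false := by
        rw [← hbridge]; exact htk2.1
      have hchem' : PySem.Chars.isIn "chemical".toList L = false := by
        rw [← hbridge]; exact htk2.2
      have hnot1 : r ≠ 1 := by
        intro h0
        rcases hcase with h | ⟨p, hp, hin, hrp⟩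
        · omega
        · rw [h0] at hrp
          simp only [vesselKeywords, List.mem_cons, List.not_mem_nil, or_false] at hp
          rcases hp with rfl|rfl|rfl|rfl|rfl|rfl|rfl|rfl|rfl|rfl|rfl|rfl|rfl <;>
            dsimp only at hrp hin <;>
            first
            | omega
            | (rw [hb'] at hin; exact absurd hin (by decide))
            | (rw [htank'] at hin; exact absurd hin (by decide))
            | (rw [hchem'] at hin; exact absurd hin (by decide))
            | (rw [hc'] at hin; exact absurd hin (by decide))
            | (rw [hro1'] at hin; exact absurd hin (by decide))
            | (rw [hro2'] at hin; exact absurd hin (by decide))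
            | (rw [hro3'] at hin; exact absurd hin (by decide))
            | (rw [hro4'] at hin; exact absurd hin (by decide))
            | (rw [hro5'] at hin; exact absurd hin (by decide))
            | (rw [hro6'] at hin; exact absurd hin (by decide))
            | (rw [hcont'] at hin; exact absurd hin (by decide))
            | (rw [hcru'] at hin; exact absurd hin (by decide))
            | (rw [hpas'] at hin; exact absurd hin (by decide))
      by_cases hcg : (PySem.Str.isIn "general cargo" (PySem.Str.lower v)
          || PySem.Str.isIn "cargo" (PySem.Str.lower v)) = true
      · have hc : PySem.Chars.isIn "cargo".toList L = true := by
          rcases or_true_elim hcg with h | h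
          · exact general_cargo_imp_cargo L (by rw [← hbridge]; exact h)
          · rw [← hbridge]; exact h
        have hle2 : r ≤ 2 := hub ("cargo".toList, 2) (by simp [vesselKeywords]) hc
        have hr2 : r = 2 := by omega
        rw [hr2, if_neg hbulk, if_neg (by rw [htk2.1, htk2.2]; decide : ¬ (PySem.Str.isIn "tanker" (PySem.Str.lower v) || PySem.Str.isIn "chemical" (PySem.Str.lower v)) = true), if_pos hcg]; rfl
      · have hcg2 := or_false_elim hcg
        have hgc' : PySem.Chars.isIn "general cargo".toList L = false := by
          rw [← hbridge]; exact hcg2.1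
        have hc' : PySem.Chars.isIn "cargo".toList L = false := by
          rw [← hbridge]; exact hcg2.2
        have hnot2 : r ≠ 2 := by
          intro h0
          rcases hcase with h | ⟨p, hp, hin, hrp⟩
          · omega
          · rw [h0] at hrp
            simp only [vesselKeywords, List.mem_cons, List.not_mem_nil, or_false] at hp
            rcases hp with rfl|rfl|rfl|rfl|rfl|rfl|rfl|rfl|rfl|rfl|rfl|rfl|rfl <;>
            dsimp only at hrp hin <;>
            first
            | omega
            | (rw [hb'] at hin; exact absurd hin (by decide))
            | (rw [htank'] at hin; exact absurd hin (by decide))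
            | (rw [hchem'] at hin; exact absurd hin (by decide))
            | (rw [hc'] at hin; exact absurd hin (by decide))
            | (rw [hro1'] at hin; exact absurd hin (by decide))
            | (rw [hro2'] at hin; exact absurd hin (by decide))
            | (rw [hro3'] at hin; exact absurd hin (by decide))
            | (rw [hro4'] at hin; exact absurd hin (by decide))
            | (rw [hro5'] at hin; exact absurd hin (by decide))
            | (rw [hro6'] at hin; exact absurd hin (by decide))
            | (rw [hcont'] at hin; exact absurd hin (by decide))
            | (rw [hcru'] at hin; exact absurd hin (by decide))
            | (rw [hpas'] at hin; exact absurd hin (by decide))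
        by_cases hrr : (["roro", "ro-ro", "pcc", "pctc", "vehicle", "car carrier"].any
            (fun x => PySem.Str.isIn x (PySem.Str.lower v))) = true
        · have hle3 : r ≤ 3 := by
            simp only [List.any_cons, List.any_nil, Bool.or_false] at hrr
            rcases or_true_elim hrr with h | hrest
            · exact hub ("roro".toList, 3) (by simp [vesselKeywords]) (by rw [← hbridge]; exact h)
            rcases or_true_elim hrest with h | hrest
            · exact hub ("ro-ro".toList, 3) (by simp [vesselKeywords]) (by rw [← hbridge]; exact h)
            rcases or_true_elim hrest with h | hrest
            · exact hub ("pcc".toList, 3) (by simp [vesselKeywords]) (by rw [← hbridge]; exact h)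
            rcases or_true_elim hrest with h | hrest
            · exact hub ("pctc".toList, 3) (by simp [vesselKeywords]) (by rw [← hbridge]; exact h)
            rcases or_true_elim hrest with h | h
            · exact hub ("vehicle".toList, 3) (by simp [vesselKeywords]) (by rw [← hbridge]; exact h)
            · exact hub ("car carrier".toList, 3) (by simp [vesselKeywords]) (by rw [← hbridge]; exact h)
          have hr3 : r = 3 := by omega
          rw [hr3, if_neg hbulk, if_neg (by rw [htk2.1, htk2.2]; decide : ¬ (PySem.Str.isIn "tanker" (PySem.Str.lower v) || PySem.Str.isIn "chemical" (PySem.Str.lower v)) = true), if_neg (by rw [hcg2.1, hcg2.2]; decide : ¬ (PySem.Str.isIn "general cargo" (PySem.Str.lower v) || PySem.Str.isIn "cargo" (PySem.Str.lower v)) = true), if_pos hrr]; rfl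
        · have hrr2 : PySem.Str.isIn "roro" (PySem.Str.lower v) = false
              ∧ PySem.Str.isIn "ro-ro" (PySem.Str.lower v) = false
              ∧ PySem.Str.isIn "pcc" (PySem.Str.lower v) = false
              ∧ PySem.Str.isIn "pctc" (PySem.Str.lower v) = false
              ∧ PySem.Str.isIn "vehicle" (PySem.Str.lower v) = false
              ∧ PySem.Str.isIn "car carrier" (PySem.Str.lower v) = false := by
            simp only [List.any_cons, List.any_nil, Bool.or_false] at hrr
            have e1 := or_false_elim hrr
            have e2 := or_false_elim (by rw [e1.2]; decide)
            have e3 := or_false_elim (a := PySem.Str.isIn "pcc" (PySem.Str.lower v)) (by rw [e2.2]; decide)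
            have e4 := or_false_elim (a := PySem.Str.isIn "pctc" (PySem.Str.lower v)) (by rw [e3.2]; decide)
            have e5 := or_false_elim (a := PySem.Str.isIn "vehicle" (PySem.Str.lower v)) (by rw [e4.2]; decide)
            exact ⟨e1.1, e2.1, e3.1, e4.1, e5.1, e5.2⟩
          have hro1' : PySem.Chars.isIn "roro".toList L = false := by rw [← hbridge]; exact hrr2.1
          have hro2' : PySem.Chars.isIn "ro-ro".toList L = false := by rw [← hbridge]; exact hrr2.2.1
          have hro3' : PySem.Chars.isIn "pcc".toList L = false := by rw [← hbridge]; exact hrr2.2.2.1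
          have hro4' : PySem.Chars.isIn "pctc".toList L = false := by rw [← hbridge]; exact hrr2.2.2.2.1
          have hro5' : PySem.Chars.isIn "vehicle".toList L = false := by rw [← hbridge]; exact hrr2.2.2.2.2.1
          have hro6' : PySem.Chars.isIn "car carrier".toList L = false := by rw [← hbridge]; exact hrr2.2.2.2.2.2
          have hnot3 : r ≠ 3 := by
            intro h0
            rcases hcase with h | ⟨p, hp, hin, hrp⟩
            · omega
            · rw [h0] at hrp
              simp only [vesselKeywords, List.mem_cons, List.not_mem_nil, or_false] at hp
              rcases hp with rfl|rfl|rfl|rfl|rfl|rfl|rfl|rfl|rfl|rfl|rfl|rfl|rfl <;>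
            dsimp only at hrp hin <;>
            first
            | omega
            | (rw [hb'] at hin; exact absurd hin (by decide))
            | (rw [htank'] at hin; exact absurd hin (by decide))
            | (rw [hchem'] at hin; exact absurd hin (by decide))
            | (rw [hc'] at hin; exact absurd hin (by decide))
            | (rw [hro1'] at hin; exact absurd hin (by decide))
            | (rw [hro2'] at hin; exact absurd hin (by decide))
            | (rw [hro3'] at hin; exact absurd hin (by decide))
            | (rw [hro4'] at hin; exact absurd hin (by decide))
            | (rw [hro5'] at hin; exact absurd hin (by decide))
            | (rw [hro6'] at hin; exact absurd hin (by decide))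
            | (rw [hcont'] at hin; exact absurd hin (by decide))
            | (rw [hcru'] at hin; exact absurd hin (by decide))
            | (rw [hpas'] at hin; exact absurd hin (by decide))
          by_cases hct : PySem.Str.isIn "container" (PySem.Str.lower v) = true
          · have hc4 : PySem.Chars.isIn "container".toList L = true := by rw [← hbridge]; exact hct
            have hle4 : r ≤ 4 := hub ("container".toList, 4) (by simp [vesselKeywords]) hc4
            have hr4 : r = 4 := by omega
            rw [hr4, if_neg hbulk, if_neg (by rw [htk2.1, htk2.2]; decide : ¬ (PySem.Str.isIn "tanker" (PySem.Str.lower v) || PySem.Str.isIn "chemical" (PySem.Str.lower v)) = true), if_neg (by rw [hcg2.1, hcg2.2]; decide : ¬ (PySem.Str.isIn "general cargo" (PySem.Str.lower v) || PySem.Str.isIn "cargo" (PySem.Str.lower v)) = true), if_neg hrr, if_pos hct]; rfl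
          · have hcont' : PySem.Chars.isIn "container".toList L = false := by
              rw [← hbridge]; cases hx : PySem.Str.isIn "container" (PySem.Str.lower v)
              · rfl
              · exact absurd hx hct
            have hnot4 : r ≠ 4 := by
              intro h0
              rcases hcase with h | ⟨p, hp, hin, hrp⟩
              · omega
              · rw [h0] at hrp
                simp only [vesselKeywords, List.mem_cons, List.not_mem_nil, or_false] at hp
                rcases hp with rfl|rfl|rfl|rfl|rfl|rfl|rfl|rfl|rfl|rfl|rfl|rfl|rfl <;>
            dsimp only at hrp hin <;>
            first
            | omega
            | (rw [hb'] at hin; exact absurd hin (by decide))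
            | (rw [htank'] at hin; exact absurd hin (by decide))
            | (rw [hchem'] at hin; exact absurd hin (by decide))
            | (rw [hc'] at hin; exact absurd hin (by decide))
            | (rw [hro1'] at hin; exact absurd hin (by decide))
            | (rw [hro2'] at hin; exact absurd hin (by decide))
            | (rw [hro3'] at hin; exact absurd hin (by decide))
            | (rw [hro4'] at hin; exact absurd hin (by decide))
            | (rw [hro5'] at hin; exact absurd hin (by decide))
            | (rw [hro6'] at hin; exact absurd hin (by decide))
            | (rw [hcont'] at hin; exact absurd hin (by decide))
            | (rw [hcru'] at hin; exact absurd hin (by decide))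
            | (rw [hpas'] at hin; exact absurd hin (by decide))
            by_cases hcp : (PySem.Str.isIn "cruise" (PySem.Str.lower v)
                || PySem.Str.isIn "passenger" (PySem.Str.lower v)) = true
            · have hle5 : r ≤ 5 := by
                rcases or_true_elim hcp with h | h
                · exact hub ("cruise".toList, 5) (by simp [vesselKeywords]) (by rw [← hbridge]; exact h)
                · exact hub ("passenger".toList, 5) (by simp [vesselKeywords]) (by rw [← hbridge]; exact h)
              have hr5 : r = 5 := by omega
              rw [hr5, if_neg hbulk, if_neg (by rw [htk2.1, htk2.2]; decide : ¬ (PySem.Str.isIn "tanker" (PySem.Str.lower v) || PySem.Str.isIn "chemical" (PySem.Str.lower v)) = true), if_neg (by rw [hcg2.1, hcg2.2]; decide : ¬ (PySem.Str.isIn "general cargo" (PySem.Str.lower v) || PySem.Str.isIn "cargo" (PySem.Str.lower v)) = true), if_neg hrr, if_neg hct, if_pos hcp]; rfl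
            · have hcp2 := or_false_elim hcp
              have hcru' : PySem.Chars.isIn "cruise".toList L = false := by
                rw [← hbridge]; exact hcp2.1
              have hpas' : PySem.Chars.isIn "passenger".toList L = false := by
                rw [← hbridge]; exact hcp2.2
              have hr6 : r = 6 := by
                rcases hcase with h | ⟨p, hp, hin, hrp⟩
                · exact h
                · exfalso
                  have hrp : r = p.2 := hrp
                  simp only [vesselKeywords, List.mem_cons, List.not_mem_nil, or_false] at hp
                  rcases hp with rfl|rfl|rfl|rfl|rfl|rfl|rfl|rfl|rfl|rfl|rfl|rfl|rfl <;>
                    dsimp only at hin <;>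
                    first
                    | (rw [hb'] at hin; exact absurd hin (by decide))
                    | (rw [htank'] at hin; exact absurd hin (by decide))
                    | (rw [hchem'] at hin; exact absurd hin (by decide))
                    | (rw [hc'] at hin; exact absurd hin (by decide))
                    | (rw [hro1'] at hin; exact absurd hin (by decide))
                    | (rw [hro2'] at hin; exact absurd hin (by decide))
                    | (rw [hro3'] at hin; exact absurd hin (by decide))
                    | (rw [hro4'] at hin; exact absurd hin (by decide))
                    | (rw [hro5'] at hin; exact absurd hin (by decide))
                    | (rw [hro6'] at hin; exact absurd hin (by decide))
                    | (rw [hcont'] at hin; exact absurd hin (by decide))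
                    | (rw [hcru'] at hin; exact absurd hin (by decide))
                    | (rw [hpas'] at hin; exact absurd hin (by decide))
              rw [hr6, if_neg hbulk, if_neg (by rw [htk2.1, htk2.2]; decide : ¬ (PySem.Str.isIn "tanker" (PySem.Str.lower v) || PySem.Str.isIn "chemical" (PySem.Str.lower v)) = true), if_neg (by rw [hcg2.1, hcg2.2]; decide : ¬ (PySem.Str.isIn "general cargo" (PySem.Str.lower v) || PySem.Str.isIn "cargo" (PySem.Str.lower v)) = true), if_neg hrr, if_neg hct, if_neg hcp]; rfl
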